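-- pv_equiv track=rewrite | github.com/guillaumehuet/AdventOfCode | 2021/14_2/solve.py | minMaxElement
-- ===== SOURCE A (Python) =====
-- def minMaxElement(polymer):
--   counts = dict()
--   for element in polymer:
--     if element in counts:
--       counts[element] += 1
--     else:
--       counts[element] = 1
--   return max(counts.values()) - min(counts.values())
-- ===== SOURCE B (Python) =====
-- def runLengths(s):
--   # s is sorted, so equal elements are contiguous: peel off the leading run, recurse.
--   if not s:
--     return []
--   n = 1
--   while n < len(s) and s[n] == s[0]:
--     n += 1
--   return [n] + runLengths(s[n:])
--
-- def minMaxElement(polymer):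
--   runs = runLengths(sorted(polymer))
--   return max(runs) - min(runs)
-- ===== Notes on version B (the rewrite author's own statement) =====
-- stated objective: alternative
-- what changed: Replaces the incremental dict-tallying pass by a sort-then-scan algorithm: sort the string so equal elements are contiguous, recursively peel off run lengths, and take max minus min of the run-length list (no counting structure at all).
import Mathlib
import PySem

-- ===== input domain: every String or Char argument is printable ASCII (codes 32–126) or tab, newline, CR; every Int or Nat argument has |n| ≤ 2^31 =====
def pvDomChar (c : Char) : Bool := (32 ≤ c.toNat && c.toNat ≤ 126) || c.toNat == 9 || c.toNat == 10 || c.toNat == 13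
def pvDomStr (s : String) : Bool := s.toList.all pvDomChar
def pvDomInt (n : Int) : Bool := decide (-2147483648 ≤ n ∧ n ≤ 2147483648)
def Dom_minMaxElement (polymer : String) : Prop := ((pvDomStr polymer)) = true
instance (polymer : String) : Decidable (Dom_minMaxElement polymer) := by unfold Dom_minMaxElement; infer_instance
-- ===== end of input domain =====

-- B replaces the incremental dict-tallying pass by sort-then-scan: sort the string so equal
-- elements are contiguous, recursively peel off run lengths, and take max - min of the runs.

-- ===== PORT A =====
-- for element in polymer: if element in counts: counts[element]+=1 else: counts[element]=1
def minMaxElement (polymer : String) : Int :=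
  let counts : PySem.Dict Char Int :=
    polymer.toList.foldl
      (fun d element =>
        if d.contains element then d.insert element (d.getD element 0 + 1)
        else d.insert element 1)
      PySem.Dict.empty
  (PySem.List.max? counts.values (fun v => v)).getD 0 -
    (PySem.List.min? counts.values (fun v => v)).getD 0

-- ===== PORT B =====
-- while n < len(s) and s[n] == s[0]: n += 1   (n = 1 + pvLeadRun s[0] s[1:])
def pvLeadRun (c : Char) : List Char → Nat
  | [] => 0
  | x :: t => if x == c then 1 + pvLeadRun c t else 0

-- runLengths: [n] + runLengths(s[n:])
def pvRunLengths : List Char → List Int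
  | [] => []
  | c :: t =>
      ((1 + pvLeadRun c t : Nat) : Int) :: pvRunLengths (t.drop (pvLeadRun c t))
termination_by s => s.length
decreasing_by
  simp only [List.length_drop, List.length_cons]; omega

-- runs = runLengths(sorted(polymer)); return max(runs) - min(runs)
def minMaxElement_alt (polymer : String) : Int :=
  let runs := pvRunLengths (PySem.List.sorted polymer.toList (fun x => x) false)
  (PySem.List.max? runs (fun v => v)).getD 0 -
    (PySem.List.min? runs (fun v => v)).getD 0

-- ===== PRECONDITION & SPEC =====
-- Pre_ excludes only the empty string, on which both A and B raise (max of an empty sequence).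
def Pre_minMaxElement (polymer : String) : Prop := polymer ≠ ""
instance (polymer : String) : Decidable (Pre_minMaxElement polymer) := by unfold Pre_minMaxElement; infer_instance
def pvWitness_minMaxElement : String := "NNCB"

def Spec_minMaxElement (polymer : String) (out : Int) : Prop := out = minMaxElement_alt polymer
instance (polymer : String) (out : Int) : Decidable (Spec_minMaxElement polymer out) := by unfold Spec_minMaxElement; infer_instance

-- ===== CLAIM (what is proved, stated in full; the proofs are below) =====
def Claim_equal_minMaxElement : Prop := ∀ (polymer : String), Dom_minMaxElement polymer → Pre_minMaxElement polymer → Spec_minMaxElement polymer (minMaxElement polymer)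

-- ===== LEMMAS AND PROOFS =====

-- A's branching update step is Counter's step: when the key is absent getD gives 0.
theorem pvStep_eq_counter (d : PySem.Dict Char Int) (x : Char) :
    (if d.contains x then d.insert x (d.getD x 0 + 1) else d.insert x 1) =
      d.insert x (d.getD x 0 + 1) := by
  by_cases h : d.contains x = true
  · simp [h]
  · have hf : d.contains x = false := by simpa using h
    have hs := PySem.Dict.contains_eq_isSome_get? d x
    rw [hf] at hs
    have hget : d.get? x = none := by
      cases hg : d.get? x with
      | none => rfl
      | some v => rw [hg] at hs; simp at hs
    simp [h, PySem.Dict.getD, hget]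

theorem pvValues_eq (polymer : String) :
    (polymer.toList.foldl
      (fun d element =>
        if d.contains element then d.insert element (d.getD element 0 + 1)
        else d.insert element 1)
      PySem.Dict.empty).values =
      (PySem.Set.ofList polymer.toList).map (fun c => (polymer.toList.count c : Int)) := by
  have hd : polymer.toList.foldl
      (fun d element =>
        if d.contains element then d.insert element (d.getD element 0 + 1)
        else d.insert element 1)
      PySem.Dict.empty = PySem.Dict.counter polymer.toList := by
    rw [← PySem.Dict.foldl_insert_getD_add_one_eq_counter]
    congr 1
    funext d x
    exact pvStep_eq_counter d x
  rw [hd]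
  have h := PySem.Dict.items_counter (xs := polymer.toList)
  have hv : (PySem.Dict.counter polymer.toList).values =
      (PySem.Dict.counter polymer.toList).items.map (·.2) := rfl
  rw [hv, h, List.map_map]
  rfl

-- The leading run named by pvLeadRun: the prefix IS replicate of the head.
theorem pvTake_leadRun (c : Char) (t : List Char) :
    t.take (pvLeadRun c t) = List.replicate (pvLeadRun c t) c := by
  induction t with
  | nil => rfl
  | cons x r ih =>
    by_cases h : x = c
    · subst h
      rw [pvLeadRun, if_pos (by simp), Nat.add_comm, List.take_succ_cons,
        List.replicate_succ, ih]
    · simp [pvLeadRun, h]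

-- What comes right after the leading run starts with a different character.
theorem pvDrop_leadRun (c : Char) (t : List Char) :
    t.drop (pvLeadRun c t) = [] ∨
      ∃ x r, t.drop (pvLeadRun c t) = x :: r ∧ x ≠ c := by
  induction t with
  | nil => exact Or.inl rfl
  | cons x r ih =>
    by_cases h : x = c
    · subst h
      rw [pvLeadRun, if_pos (by simp), Nat.add_comm, List.drop_succ_cons]
      exact ih
    · exact Or.inr ⟨x, r, by simp [pvLeadRun, h], h⟩

-- After the leading run of a sorted list, the head never recurs.
theorem pvHead_not_mem_drop (c : Char) (t : List Char)
    (hp : (c :: t).Pairwise (· ≤ ·)) : c ∉ t.drop (pvLeadRun c t) := by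
  rcases pvDrop_leadRun c t with h | ⟨x, r, hx, hne⟩
  · simp [h]
  · intro hmem
    rw [hx] at hmem
    have hsub : (x :: r).Sublist t := hx ▸ List.drop_sublist _ t
    have hle : ∀ y ∈ t, c ≤ y := (List.pairwise_cons.mp hp).1
    have hcx : c < x :=
      lt_of_le_of_ne (hle x (hsub.subset (by simp))) (Ne.symm hne)
    have hpx : (x :: r).Pairwise (· ≤ ·) :=
      ((List.pairwise_cons.mp hp).2).sublist hsub
    rcases List.mem_cons.mp hmem with h1 | h1
    · exact absurd h1 (ne_of_lt hcx)
    · exact absurd ((List.pairwise_cons.mp hpx).1 c h1) (not_le.mpr hcx)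

-- set-building facts: a duplicated head collapses; a fresh head is prepended.
theorem pvOfList_cons_cons (c : Char) (l : List Char) :
    PySem.Set.ofList (c :: c :: l) = PySem.Set.ofList (c :: l) := by
  rw [PySem.Set.ofList_eq_foldl, PySem.Set.ofList_eq_foldl]
  simp [List.foldl, PySem.Set.add_of_not_mem, PySem.Set.add_of_mem]

theorem pvOfList_cons_not_mem (c : Char) (l : List Char) (h : c ∉ l) :
    PySem.Set.ofList (c :: l) = c :: PySem.Set.ofList l := by
  rw [PySem.Set.ofList_cons]
  congr 1
  have hns : c ∉ PySem.Set.ofList l := fun hc => h ((PySem.Set.mem_ofList _ _).mp hc)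
  simp only [PySem.Set.discard]
  exact List.filter_eq_self.mpr (fun y hy => by simp; exact fun e => hns (e ▸ hy))

-- Run lengths of a sorted list are exactly the counts, listed over set(s).
theorem pvRunLengths_sorted : ∀ (s : List Char), s.Pairwise (· ≤ ·) →
    pvRunLengths s = (PySem.Set.ofList s).map (fun c => (s.count c : Int)) := by
  intro s
  induction s using pvRunLengths.induct with
  | case1 => intro _; simp [pvRunLengths]
  | case2 c t ih =>
    intro hp
    obtain ⟨k, rest, hk, hcr, ht⟩ :
        ∃ k rest, pvLeadRun c t = k ∧ c ∉ rest ∧ t = List.replicate k c ++ rest := by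
      refine ⟨pvLeadRun c t, t.drop (pvLeadRun c t), rfl, pvHead_not_mem_drop c t hp, ?_⟩
      conv_lhs => rw [← List.take_append_drop (pvLeadRun c t) t]
      rw [pvTake_leadRun]
    have hdk : t.drop k = rest := by
      rw [ht]
      exact List.drop_left' (by simp)
    rw [hk] at ih
    rw [hdk] at ih
    have hpr : rest.Pairwise (· ≤ ·) := by
      rw [← hdk]
      exact ((List.pairwise_cons.mp hp).2).sublist (List.drop_sublist _ t)
    -- set(c :: t) = c :: set(rest)
    have hset : PySem.Set.ofList (c :: t) = c :: PySem.Set.ofList rest := by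
      rw [ht]
      have hall : ∀ m : Nat, PySem.Set.ofList (c :: (List.replicate m c ++ rest)) =
          c :: PySem.Set.ofList rest := by
        intro m
        induction m with
        | zero => simpa using pvOfList_cons_not_mem c rest hcr
        | succ m ihm =>
          rw [List.replicate_succ, show c :: (c :: List.replicate m c ++ rest) =
            c :: c :: (List.replicate m c ++ rest) from rfl,
            pvOfList_cons_cons, ihm]
      exact hall k
    -- counts
    have hcc : (c :: t).count c = 1 + k := by
      rw [ht]
      simp [List.count_append, List.count_eq_zero.mpr hcr]
      omega
    have hcx : ∀ x ∈ PySem.Set.ofList rest, (c :: t).count x = rest.count x := by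
      intro x hx
      have hxr : x ∈ rest := (PySem.Set.mem_ofList _ _).mp hx
      have hxc : c ≠ x := fun h => hcr (h ▸ hxr)
      rw [ht]
      simp [List.count_append, hxc, List.count_replicate]
    rw [pvRunLengths, hk, hdk, ih hpr, hset, List.map_cons, hcc]
    exact congrArg _ ((List.map_congr_left (fun x hx => by rw [hcx x hx])).symm)

-- max/min VALUES of Int lists are permutation-invariant.
theorem pvMax?_eq_of_perm (xs ys : List Int) (h : xs.Perm ys) :
    PySem.List.max? xs (fun v => v) = PySem.List.max? ys (fun v => v) := by
  cases hx : PySem.List.max? xs (fun v => v) with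
  | none =>
    rw [(PySem.List.max?_eq_none_iff _ _).mp hx] at h
    rw [(PySem.List.max?_eq_none_iff _ _).mpr h.symm.eq_nil]
  | some m =>
    cases hy : PySem.List.max? ys (fun v => v) with
    | none =>
      rw [(PySem.List.max?_eq_none_iff _ _).mp hy] at h
      rw [h.eq_nil, (PySem.List.max?_eq_none_iff _ _).mpr rfl] at hx
      simp at hx
    | some m' =>
      have hm : m ∈ xs := PySem.List.max?_mem hx
      have hm' : m' ∈ ys := PySem.List.max?_mem hy
      have h1 : m ≤ m' := PySem.List.max?_isMax hy m (h.mem_iff.mp hm)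
      have h2 : m' ≤ m := PySem.List.max?_isMax hx m' (h.mem_iff.mpr hm')
      rw [le_antisymm h1 h2]

theorem pvMin?_eq_of_perm (xs ys : List Int) (h : xs.Perm ys) :
    PySem.List.min? xs (fun v => v) = PySem.List.min? ys (fun v => v) := by
  cases hx : PySem.List.min? xs (fun v => v) with
  | none =>
    rw [(PySem.List.min?_eq_none_iff _ _).mp hx] at h
    rw [(PySem.List.min?_eq_none_iff _ _).mpr h.symm.eq_nil]
  | some m =>
    cases hy : PySem.List.min? ys (fun v => v) with
    | none =>
      rw [(PySem.List.min?_eq_none_iff _ _).mp hy] at h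
      rw [h.eq_nil, (PySem.List.min?_eq_none_iff _ _).mpr rfl] at hx
      simp at hx
    | some m' =>
      have hm : m ∈ xs := PySem.List.min?_mem hx
      have hm' : m' ∈ ys := PySem.List.min?_mem hy
      have h1 : m ≤ m' := PySem.List.min?_isMin hx m' (h.mem_iff.mpr hm')
      have h2 : m' ≤ m := PySem.List.min?_isMin hy m (h.mem_iff.mp hm)
      rw [le_antisymm h1 h2]

-- B's run-length list is a permutation of A's dict values.
theorem pvRuns_perm_values (l : List Char) :
    (pvRunLengths (PySem.List.sorted l (fun x => x) false)).Perm
      ((PySem.Set.ofList l).map (fun c => (l.count c : Int))) := by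
  have hperm : (PySem.List.sorted l (fun x => x) false).Perm l :=
    PySem.List.sorted_perm _ _ _
  have hpw : (PySem.List.sorted l (fun x => x) false).Pairwise (· ≤ ·) := by
    simpa using PySem.List.sorted_pairwise (xs := l) (key := fun x : Char => x)
  rw [pvRunLengths_sorted _ hpw,
    List.map_congr_left (fun x _ => by rw [hperm.count_eq] :
      ∀ x ∈ PySem.Set.ofList (PySem.List.sorted l (fun x => x) false),
        ((PySem.List.sorted l (fun x => x) false).count x : Int) = (l.count x : Int))]
  refine List.Perm.map _ ?_
  exact (List.perm_ext_iff_of_nodup (PySem.Set.nodup_ofList _) (PySem.Set.nodup_ofList _)).mpr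
    (fun a => by rw [PySem.Set.mem_ofList, PySem.Set.mem_ofList, hperm.mem_iff])

-- ===== VERDICT (by name: the statement is the Claim_ definition above) =====
theorem minMaxElement_spec : Claim_equal_minMaxElement := by
  intro polymer _ _
  unfold Spec_minMaxElement
  simp only [minMaxElement, minMaxElement_alt]
  rw [pvValues_eq, ← pvMax?_eq_of_perm _ _ (pvRuns_perm_values polymer.toList),
    ← pvMin?_eq_of_perm _ _ (pvRuns_perm_values polymer.toList)]
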